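-- pv_equiv track=rewrite | github.com/zakhildev/ok-solvery | src/solvers.py | list_scheduling
-- ===== SOURCE A (Python) =====
-- import heapq
--
-- def list_scheduling(p_times, m):
--     """
--     Algorytm zachłanny LS dla P || Cmax.
--     """
--     # Kolejka priorytetowa maszyn: (moment_zakończenia, id_maszyny)
--     machines = [(0, i) for i in range(m)]
--     heapq.heapify(machines)
--
--     task_assignments = [[] for _ in range(m)]
--
--     for i, p in enumerate(p_times):
--         finish_time, machine_id = heapq.heappop(machines)
--
--         start_time = finish_time
--         new_finish_time = start_time + p
--
--         task_assignments[machine_id].append(i + 1)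
--         heapq.heappush(machines, (new_finish_time, machine_id))
--
--     c_max = max(m[0] for m in machines) # Po pętli heap może nie być posortowany idealnie, ale max wyciągniemy
--     # Lepiej:
--     c_max = max(item[0] for item in machines)
--     return c_max, task_assignments
-- ===== SOURCE B (Python) =====
-- def list_scheduling(p_times, m):
--     """
--     Algorytm zachlanny LS dla P || Cmax.
--     Simpler: machines as a plain finish-time list; each task goes to the machine
--     holding the minimum finish time (first such index, i.e. lowest machine id).
--     """
--     finish = [0] * m
--     task_assignments = [[] for _ in range(m)]
--     for i, p in enumerate(p_times):
--         j = finish.index(min(finish))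
--         task_assignments[j].append(i + 1)
--         finish[j] += p
--     c_max = max(finish)
--     return c_max, task_assignments
-- ===== Notes on version B (the rewrite author's own statement) =====
-- stated objective: simpler
-- what changed: Replaced the heapq priority queue of (finish_time, machine_id) pairs by a plain per-machine finish-time list: each task goes to finish.index(min(finish)), the first index holding the minimum finish time (which matches the heap's (finish, id) tie-breaking), updated in place.
import Mathlib
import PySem

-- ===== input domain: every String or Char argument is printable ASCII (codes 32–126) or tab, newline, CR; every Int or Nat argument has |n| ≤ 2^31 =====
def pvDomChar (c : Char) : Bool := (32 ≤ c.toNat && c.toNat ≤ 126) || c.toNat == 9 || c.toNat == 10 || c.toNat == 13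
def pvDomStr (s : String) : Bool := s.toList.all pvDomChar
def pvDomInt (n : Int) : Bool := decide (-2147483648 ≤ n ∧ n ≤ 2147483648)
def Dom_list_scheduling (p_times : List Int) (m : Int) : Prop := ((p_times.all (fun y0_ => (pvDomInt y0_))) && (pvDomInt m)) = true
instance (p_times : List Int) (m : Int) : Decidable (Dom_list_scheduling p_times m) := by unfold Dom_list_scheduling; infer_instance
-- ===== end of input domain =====

-- B replaces A's heapq priority queue by a plain per-machine finish-time list, picking
-- finish.index(min(finish)) per task (objective: simpler); same schedule, same return value.

-- ===== PORT A =====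
-- Python tuple comparison (finish_time, machine_id) < (finish_time', machine_id'):
-- lexicographic on Int pairs (exact: both components are ints).
def pairLtA (a b : Int × Int) : Bool :=
  decide (a.1 < b.1) || (a.1 == b.1 && decide (a.2 < b.2))

-- heapq modeled by its contract: heappop returns the minimum pair under Python's
-- tuple order and removes it (first occurrence), heappush appends.  Exact for A's
-- observable behaviour: heappop is specified to return the heap's minimum, and the
-- returned value is all A ever reads from the heap (the internal array layout of
-- heapify/siftup is unobservable in A's result).
def heapPopMin : List (Int × Int) → Option (Int × Int)
  | [] => none
  | x :: xs => some (xs.foldl (fun best y => if pairLtA y best then y else best) x)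

-- loop body of A's 'for i, p in enumerate(p_times)'
def stepA (st : List (Int × Int) × List (List Int)) (ip : Int × Int) :
    List (Int × Int) × List (List Int) :=
  match heapPopMin st.1 with
  | none => st   -- heappop from an empty heap: IndexError, excluded by Pre_
  | some fm =>
    (st.1.erase fm ++ [(fm.1 + ip.2, fm.2)],
     PySem.List.pySetD st.2 fm.2 (PySem.List.pyGetD st.2 fm.2 [] ++ [ip.1 + 1]))

def list_scheduling (p_times : List Int) (m : Int) : Int × List (List Int) :=
  let machines : List (Int × Int) := (PySem.List.pyRange 0 m 1).map (fun i => ((0 : Int), i))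
  let task_assignments : List (List Int) := (PySem.List.pyRange 0 m 1).map (fun _ => ([] : List Int))
  let st := (PySem.List.enumerate p_times 0).foldl stepA (machines, task_assignments)
  -- Python computes c_max twice with two identical expressions; ported once.
  (((PySem.List.max? (st.1.map Prod.fst) (fun x => x)).getD 0), st.2)

-- ===== PORT B =====
-- 'j = finish.index(min(finish))': the first index holding the minimum finish time
def bMinIdx (finish : List Int) : Int :=
  match PySem.List.min? finish (fun x => x) with
  | none => 0   -- min() of an empty list: ValueError, excluded by Pre_
  | some v => ((PySem.List.index? finish v).getD 0 : Nat)

-- loop body of B's 'for i, p in enumerate(p_times)'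
def stepB (st : List Int × List (List Int)) (ip : Int × Int) :
    List Int × List (List Int) :=
  let j := bMinIdx st.1
  (PySem.List.pySetD st.1 j (PySem.List.pyGetD st.1 j 0 + ip.2),
   PySem.List.pySetD st.2 j (PySem.List.pyGetD st.2 j [] ++ [ip.1 + 1]))

def list_scheduling_alt (p_times : List Int) (m : Int) : Int × List (List Int) :=
  let finish : List Int := PySem.List.pyRepeat [0] m
  let task_assignments : List (List Int) := (PySem.List.pyRange 0 m 1).map (fun _ => ([] : List Int))
  let st := (PySem.List.enumerate p_times 0).foldl stepB (finish, task_assignments)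
  (((PySem.List.max? st.1 (fun x => x)).getD 0), st.2)

-- ===== PRECONDITION & SPEC =====
-- Pre_ excludes only m ≤ 0, where the Python A raises (IndexError on heappop with
-- tasks present, else ValueError on max of an empty sequence); B raises there too.
def Pre_list_scheduling (p_times : List Int) (m : Int) : Prop := 1 ≤ m
instance (p_times : List Int) (m : Int) : Decidable (Pre_list_scheduling p_times m) := by
  unfold Pre_list_scheduling; infer_instance

def pvWitness_list_scheduling : List Int × Int := ([3, 1, 2, 2, 4], 2)

def Spec_list_scheduling (p_times : List Int) (m : Int) (out : Int × List (List Int)) : Prop := out = list_scheduling_alt p_times m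
instance (p_times : List Int) (m : Int) (out : Int × List (List Int)) : Decidable (Spec_list_scheduling p_times m out) := by unfold Spec_list_scheduling; infer_instance

-- ===== CLAIM (what is proved, stated in full; the proofs are below) =====
def Claim_equal_list_scheduling : Prop := ∀ (p_times : List Int) (m : Int), Dom_list_scheduling p_times m → Pre_list_scheduling p_times m → Spec_list_scheduling p_times m (list_scheduling p_times m)

-- ===== LEMMAS AND PROOFS =====

-- the machine pairs (finish_time, machine_id) described by a finish-time list
def enumF (finish : List Int) : List (Int × Int) :=
  (PySem.List.enumerate finish 0).map (fun p => (p.2, p.1))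

-- lexicographic ≤ on (finish_time, machine_id), Python's tuple order
def lexLe (a b : Int × Int) : Prop := a.1 < b.1 ∨ (a.1 = b.1 ∧ a.2 ≤ b.2)

lemma pairLtA_false_iff (a b : Int × Int) : pairLtA a b = false ↔ lexLe b a := by
  simp [pairLtA, lexLe]; omega

lemma lexLe_refl (a : Int × Int) : lexLe a a := Or.inr ⟨rfl, le_refl _⟩

lemma lexLe_trans {a b c : Int × Int} (h1 : lexLe a b) (h2 : lexLe b c) : lexLe a c := by
  rcases a with ⟨a1, a2⟩; rcases b with ⟨b1, b2⟩; rcases c with ⟨c1, c2⟩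
  simp only [lexLe] at *; omega

lemma lexLe_antisymm {a b : Int × Int} (h1 : lexLe a b) (h2 : lexLe b a) : a = b := by
  rcases a with ⟨a1, a2⟩; rcases b with ⟨b1, b2⟩
  simp only [lexLe] at h1 h2; simp only [Prod.ext_iff]; omega

lemma lexLe_of_pairLtA_true {a b : Int × Int} (h : pairLtA a b = true) : lexLe a b := by
  rcases a with ⟨a1, a2⟩; rcases b with ⟨b1, b2⟩
  simp [pairLtA] at h; simp [lexLe]; omega

lemma lexLe_if_left (y b : Int × Int) : lexLe (if pairLtA y b then y else b) b := by
  split_ifs with h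
  · exact lexLe_of_pairLtA_true h
  · exact lexLe_refl b

lemma lexLe_if_right (y b : Int × Int) : lexLe (if pairLtA y b then y else b) y := by
  split_ifs with h
  · exact lexLe_refl y
  · exact (pairLtA_false_iff y b).mp (by simpa using h)

lemma foldMin_spec (xs : List (Int × Int)) : ∀ b : Int × Int,
    (xs.foldl (fun best y => if pairLtA y best then y else best) b) ∈ b :: xs ∧
    ∀ y ∈ b :: xs, lexLe (xs.foldl (fun best y => if pairLtA y best then y else best) b) y := by
  induction xs with
  | nil => intro b; simp [lexLe_refl]
  | cons y t ih =>
    intro b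
    simp only [List.foldl_cons]
    obtain ⟨hmem, hall⟩ := ih (if pairLtA y b then y else b)
    have hrb' := hall _ List.mem_cons_self
    constructor
    · rcases List.mem_cons.1 hmem with h | h
      · rw [h]; split_ifs <;> simp
      · simp [h]
    · intro z hz
      rcases List.mem_cons.1 hz with h | hz'
      · subst h; exact lexLe_trans hrb' (lexLe_if_left y z)
      · rcases List.mem_cons.1 hz' with h | h
        · subst h; exact lexLe_trans hrb' (lexLe_if_right z b)
        · exact hall _ (List.mem_cons_of_mem _ h)

lemma heapPopMin_spec (l : List (Int × Int)) (r : Int × Int)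
    (h : heapPopMin l = some r) : r ∈ l ∧ ∀ y ∈ l, lexLe r y := by
  cases l with
  | nil => simp [heapPopMin] at h
  | cons x xs =>
    simp only [heapPopMin, Option.some.injEq] at h
    subst h
    exact foldMin_spec xs x

-- first-argmin property of the scan result over finish[0..t)
def IsFirstMin (finish : List Int) (t : Int) (j : Int) : Prop :=
  0 ≤ j ∧ j < t ∧ ∀ k : Int, 0 ≤ k → k < t →
    (finish.getD j.toNat 0 < finish.getD k.toNat 0 ∨
     (finish.getD j.toNat 0 = finish.getD k.toNat 0 ∧ j ≤ k))

lemma pyGetD_int (finish : List Int) (j : Int) (hj : 0 ≤ j) :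
    PySem.List.pyGetD finish j 0 = finish.getD j.toNat 0 := by
  conv_lhs => rw [show j = ((j.toNat : Nat) : Int) from (Int.toNat_of_nonneg hj).symm]
  rw [PySem.List.pyGetD_natCast]

lemma bMinIdx_spec (finish : List Int) (hne : finish ≠ []) :
    IsFirstMin finish (finish.length : Int) (bMinIdx finish) := by
  obtain ⟨v, hv⟩ : ∃ v, PySem.List.min? finish (fun x => x) = some v := by
    cases h : PySem.List.min? finish (fun x => x) with
    | none => exact absurd ((PySem.List.min?_eq_none_iff _ _).mp h) hne
    | some v => exact ⟨v, rfl⟩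
  have hvmem : v ∈ finish := PySem.List.min?_mem hv
  have hvmin : ∀ y ∈ finish, v ≤ y := PySem.List.min?_isMin hv
  obtain ⟨kn, hidx⟩ : ∃ kn, PySem.List.index? finish v = some kn :=
    Option.isSome_iff_exists.mp ((PySem.List.index?_isSome_iff _ _).mpr hvmem)
  obtain ⟨hkn, hfk, hprev⟩ := PySem.List.getElem_of_index?_eq_some hidx
  have hb : bMinIdx finish = (kn : Int) := by
    unfold bMinIdx
    rw [hv]
    show ((PySem.List.index? finish v).getD 0 : Nat) = (kn : Int)
    rw [hidx]; rfl
  rw [hb]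
  refine ⟨by positivity, by exact_mod_cast hkn, fun k hk0 hk1 => ?_⟩
  have hklen : k.toNat < finish.length := by omega
  rw [Int.toNat_natCast, List.getD_eq_getElem _ _ hkn, List.getD_eq_getElem _ _ hklen, hfk]
  rcases lt_or_eq_of_le (hvmin _ (List.getElem_mem hklen)) with h | h
  · exact Or.inl h
  · refine Or.inr ⟨h, ?_⟩
    by_contra hlt
    exact hprev k.toNat (by omega) h.symm

-- enumF basics
lemma length_enumF (f : List Int) : (enumF f).length = f.length := by
  simp [enumF, PySem.List.length_enumerate]

lemma getElem_enumF (f : List Int) (k : Nat) (hk : k < f.length) :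
    (enumF f)[k]'(by simpa [length_enumF] using hk) = (f[k], (k : Int)) := by
  simp [enumF, PySem.List.getElem_enumerate]

lemma mem_enumF (f : List Int) (y : Int × Int) :
    y ∈ enumF f ↔ ∃ (k : Nat) (hk : k < f.length), y = (f[k], (k : Int)) := by
  constructor
  · intro hy
    obtain ⟨k, hk, hget⟩ := List.getElem_of_mem hy
    exact ⟨k, by simpa [length_enumF] using hk, by rw [← hget, getElem_enumF]⟩
  · rintro ⟨k, hk, rfl⟩
    have := getElem_enumF f k hk
    exact this ▸ List.getElem_mem _

lemma enumF_set (f : List Int) (n : Nat) (hn : n < f.length) (w : Int) :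
    enumF (f.set n w) = (enumF f).set n (w, (n : Int)) := by
  apply List.ext_getElem
  · simp [length_enumF]
  · intro k h1 h2
    have hk : k < f.length := by simpa [length_enumF] using h2
    rw [List.getElem_set]
    rcases eq_or_ne n k with h | h
    · subst h
      rw [getElem_enumF _ _ (by simpa using hk)]
      simp
    · rw [getElem_enumF _ _ (by simpa using hk), getElem_enumF _ _ hk]
      simp [h]

lemma erase_eq_eraseIdx {α : Type} [BEq α] [LawfulBEq α] (l : List α) (n : Nat)
    (hn : n < l.length) (h : ∀ i (hi : i < n), l[i]'(by omega) ≠ l[n]) :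
    l.erase (l[n]'hn) = l.eraseIdx n := by
  induction l generalizing n with
  | nil => simp at hn
  | cons a t ih =>
    cases n with
    | zero => simp
    | succ n =>
      have ha : a ≠ (a :: t)[n+1]'hn := h 0 (by omega)
      rw [List.eraseIdx_cons_succ]
      rw [show (a :: t)[n+1]'hn = t[n]'(by simpa using hn) from rfl] at ha ⊢
      rw [List.erase_cons_tail (by simpa using ha), ih n (by simpa using hn)
        (fun i hi => by simpa using h (i+1) (by omega))]

lemma eraseIdx_append_perm_set {α : Type} (l : List α) (n : Nat) (hn : n < l.length) (v : α) :
    (l.eraseIdx n ++ [v]).Perm (l.set n v) := by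
  rw [List.eraseIdx_eq_take_drop_succ, List.set_eq_take_cons_drop v hn, List.append_assoc]
  exact List.Perm.append_left _ ((List.perm_append_singleton v _).trans (List.Perm.refl _))

-- max over a permutation (identity key, Int)
lemma max?_perm {l l' : List Int} (h : l.Perm l') :
    PySem.List.max? l (fun x => x) = PySem.List.max? l' (fun x => x) := by
  rcases hl : PySem.List.max? l (fun x => x) with _ | v
  · have hnil : l = [] := (PySem.List.max?_eq_none_iff _ _).mp hl
    subst hnil
    have hnil' : l' = [] := h.symm.eq_nil
    subst hnil'
    rw [hl]
  · rcases hl' : PySem.List.max? l' (fun x => x) with _ | v'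
    · have hnil' : l' = [] := (PySem.List.max?_eq_none_iff _ _).mp hl'
      subst hnil'
      have hnil : l = [] := h.eq_nil
      subst hnil
      rw [(PySem.List.max?_eq_none_iff _ _).mpr rfl] at hl
      exact absurd hl (by simp)
    · have h1 : v ≤ v' := PySem.List.max?_isMax hl' v (h.mem_iff.mp (PySem.List.max?_mem hl))
      have h2 : v' ≤ v := PySem.List.max?_isMax hl v' (h.symm.mem_iff.mp (PySem.List.max?_mem hl'))
      exact congrArg some (le_antisymm h1 h2)

-- the simulation relation between A's heap state and B's finish-list state
def SchedRel (m : Int) (stA : List (Int × Int) × List (List Int))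
    (stB : List Int × List (List Int)) : Prop :=
  stA.1.Perm (enumF stB.1) ∧ stA.2 = stB.2 ∧ stB.1.length = m.toNat

lemma step_rel (m : Int) (hm : 1 ≤ m) (stA : List (Int × Int) × List (List Int))
    (stB : List Int × List (List Int)) (ip : Int × Int) (h : SchedRel m stA stB) :
    SchedRel m (stepA stA ip) (stepB stB ip) := by
  obtain ⟨hp, hasg, hlen⟩ := h
  obtain ⟨machines, asgA⟩ := stA
  obtain ⟨finish, asgB⟩ := stB
  simp only at hp hasg hlen
  subst hasg
  -- B's chosen machine index
  have hfne : finish ≠ [] := by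
    intro hnil; rw [hnil] at hlen; simp at hlen; omega
  have hspec : IsFirstMin finish (finish.length : Int) (bMinIdx finish) := bMinIdx_spec finish hfne
  set j := bMinIdx finish with hj
  obtain ⟨h0j, hjm, hjspec⟩ := hspec
  have hjlen : j.toNat < finish.length := by omega
  -- x' is the pair B selects; it is the lexLe-minimum of enumF finish
  set x' : Int × Int := (finish[j.toNat]'hjlen, (j.toNat : Int)) with hx'
  have hx'j : ((j.toNat : Nat) : Int) = j := Int.toNat_of_nonneg h0j
  have hx'mem : x' ∈ enumF finish := (mem_enumF _ _).mpr ⟨j.toNat, hjlen, rfl⟩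
  have hx'min : ∀ y ∈ enumF finish, lexLe x' y := by
    intro y hy
    obtain ⟨k, hk, rfl⟩ := (mem_enumF _ _).mp hy
    have := hjspec (k : Int) (by positivity) (by exact_mod_cast hk)
    simp only [Int.toNat_natCast] at this
    rw [List.getD_eq_getElem _ _ hjlen, List.getD_eq_getElem _ _ hk] at this
    rcases this with h | h
    · exact Or.inl h
    · refine Or.inr ⟨h.1, ?_⟩
      show ((j.toNat : Nat) : Int) ≤ (k : Int)
      omega
  -- A pops exactly x'
  have hmne : machines ≠ [] := by
    intro hnil
    have := hp.length_eq
    rw [hnil, length_enumF] at this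
    simp at this; omega
  obtain ⟨r, hr⟩ : ∃ r, heapPopMin machines = some r := by
    cases machines with
    | nil => exact absurd rfl hmne
    | cons x xs => exact ⟨_, rfl⟩
  obtain ⟨hrmem, hrmin⟩ := heapPopMin_spec machines r hr
  have hrx : r = x' := by
    have h1 : lexLe x' r := hx'min r (hp.mem_iff.mp hrmem)
    have h2 : lexLe r x' := hrmin x' (hp.mem_iff.mpr hx'mem)
    exact lexLe_antisymm h2 h1
  subst hrx
  -- unfold both steps
  simp only [stepA, stepB, hr]
  rw [← hj]
  have hpg : PySem.List.pyGetD finish j 0 = finish[j.toNat]'hjlen := by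
    rw [pyGetD_int finish j h0j, List.getD_eq_getElem _ _ hjlen]
  have hps : PySem.List.pySetD finish j (PySem.List.pyGetD finish j 0 + ip.2) =
      finish.set j.toNat (finish[j.toNat]'hjlen + ip.2) := by
    rw [hpg, PySem.List.pySetD_of_nonneg _ _ h0j]
  refine ⟨?_, ?_, ?_⟩
  · -- permutation of the new heap with the new enumF
    show (machines.erase x' ++ [(x'.1 + ip.2, x'.2)]).Perm
      (enumF (PySem.List.pySetD finish j (PySem.List.pyGetD finish j 0 + ip.2)))
    rw [hps, enumF_set _ _ hjlen]
    have e1 : (machines.erase x').Perm ((enumF finish).erase x') := hp.erase x'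
    have e2 : (enumF finish).erase x' = (enumF finish).eraseIdx j.toNat := by
      have hjE : j.toNat < (enumF finish).length := by rwa [length_enumF]
      have hEx : (enumF finish)[j.toNat]'hjE = x' := by
        rw [getElem_enumF _ _ hjlen]
      rw [← hEx]
      apply erase_eq_eraseIdx
      intro i hi
      rw [getElem_enumF _ _ (by omega), getElem_enumF _ _ hjlen]
      intro hcontra
      have : (i : Int) = (j.toNat : Int) := congrArg Prod.snd hcontra
      omega
    have e3 : ((enumF finish).eraseIdx j.toNat ++
        [(finish[j.toNat]'hjlen + ip.2, (j.toNat : Int))]).Perm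
        ((enumF finish).set j.toNat (finish[j.toNat]'hjlen + ip.2, (j.toNat : Int))) :=
      eraseIdx_append_perm_set _ _ (by rwa [length_enumF]) _
    have e4 := e1.append_right [(x'.1 + ip.2, x'.2)]
    rw [e2] at e4
    exact e4.trans e3
  · -- the assignment lists are updated identically
    show PySem.List.pySetD asgA x'.2 (PySem.List.pyGetD asgA x'.2 [] ++ [ip.1 + 1]) =
        PySem.List.pySetD asgA j (PySem.List.pyGetD asgA j [] ++ [ip.1 + 1])
    rw [show x'.2 = j from hx'j]
  · show (PySem.List.pySetD finish j (PySem.List.pyGetD finish j 0 + ip.2)).length = m.toNat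
    rw [hps, List.length_set, hlen]

lemma fold_rel (m : Int) (hm : 1 ≤ m) (l : List (Int × Int)) :
    ∀ (stA : List (Int × Int) × List (List Int)) (stB : List Int × List (List Int)),
    SchedRel m stA stB → SchedRel m (l.foldl stepA stA) (l.foldl stepB stB) := by
  induction l with
  | nil => intro stA stB h; simpa using h
  | cons ip t ih =>
    intro stA stB h
    simp only [List.foldl_cons]
    exact ih _ _ (step_rel m hm stA stB ip h)

lemma map_fst_enumF (f : List Int) : (enumF f).map Prod.fst = f := by
  simp [enumF, List.map_map]
  exact PySem.List.map_snd_enumerate f 0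

lemma init_rel (m : Int) (hm : 1 ≤ m) :
    ((PySem.List.pyRange 0 m 1).map (fun i => ((0 : Int), i))).Perm
      (enumF (PySem.List.pyRepeat [(0 : Int)] m)) ∧
    (PySem.List.pyRepeat [(0 : Int)] m).length = m.toNat := by
  have hrep : PySem.List.pyRepeat [(0 : Int)] m = List.replicate m.toNat 0 :=
    PySem.List.pyRepeat_singleton 0 m
  constructor
  · rw [hrep]
    have : enumF (List.replicate m.toNat (0 : Int)) =
        (PySem.List.pyRange 0 m 1).map (fun i => ((0 : Int), i)) := by
      apply List.ext_getElem
      · simp [length_enumF, PySem.List.length_pyRange_one]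
      · intro k h1 h2
        have hk : k < m.toNat := by simpa [length_enumF] using h1
        rw [getElem_enumF _ _ (by simpa using hk)]
        simp [PySem.List.getElem_pyRange_one]
    rw [this]
  · rw [hrep]; simp

-- ===== VERDICT (by name: the statement is the Claim_ definition above) =====
theorem list_scheduling_spec : Claim_equal_list_scheduling := by
  intro p_times m _hdom hpre
  unfold Spec_list_scheduling list_scheduling list_scheduling_alt
  have hm : 1 ≤ m := hpre
  obtain ⟨hperm, hlen⟩ := init_rel m hm
  have hrel := fold_rel m hm (PySem.List.enumerate p_times 0)
    ((PySem.List.pyRange 0 m 1).map (fun i => ((0 : Int), i)),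
      (PySem.List.pyRange 0 m 1).map (fun _ => ([] : List Int)))
    (PySem.List.pyRepeat [0] m,
      (PySem.List.pyRange 0 m 1).map (fun _ => ([] : List Int)))
    ⟨hperm, rfl, by simpa using hlen⟩
  obtain ⟨hp, hasg, _⟩ := hrel
  refine Prod.ext ?_ hasg
  show (PySem.List.max? _ (fun x => x)).getD 0 = (PySem.List.max? _ (fun x => x)).getD 0
  rw [max?_perm (hp.map Prod.fst), map_fst_enumF]
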